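-- pv_equiv track=rewrite | github.com/tmu-nlp/100knock2018 | tosho/chapter01/knock03.py | create_word_counts
-- ===== SOURCE A (Python) =====
-- def create_word_counts(s):
--     s = s.replace(',', '')
--     s = s.replace('.', '')
--
--     words = s.split(' ')
--     l = []
--     for word in words:
--         l.append(len(word))
--
--     return l
-- ===== SOURCE B (Python) =====
-- def create_word_counts(s):
--     l = []
--     n = 0
--     for c in s:
--         if c == ',' or c == '.':
--             continue
--         if c == ' ':
--             l.append(n)
--             n = 0
--         else:
--             n += 1
--     l.append(n)
--     return l
-- ===== Notes on version B (the rewrite author's own statement) =====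
-- stated objective: alternative
-- what changed: replaced the replace+split+map-length pipeline (three full passes building intermediate strings and a word list) with a single character-level pass that keeps a running count, flushed to the output on each space
import Mathlib
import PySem

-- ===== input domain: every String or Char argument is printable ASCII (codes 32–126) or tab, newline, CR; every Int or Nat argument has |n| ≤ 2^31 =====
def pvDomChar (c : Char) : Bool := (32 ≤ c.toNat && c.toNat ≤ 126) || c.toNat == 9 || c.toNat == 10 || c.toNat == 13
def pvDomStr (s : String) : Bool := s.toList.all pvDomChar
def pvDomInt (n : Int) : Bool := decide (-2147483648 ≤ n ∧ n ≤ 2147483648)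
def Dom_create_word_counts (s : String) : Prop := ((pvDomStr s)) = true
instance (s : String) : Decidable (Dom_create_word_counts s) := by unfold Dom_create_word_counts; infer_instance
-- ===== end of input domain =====

-- B replaces A's replace+split+map-length pipeline by a single character pass with a running count (alternative decomposition, same cost).

-- ===== PORT A =====
def create_word_counts (s : String) : List Int :=
  let s1 := PySem.Str.replace s "," ""
  let s2 := PySem.Str.replace s1 "." ""
  let words := (PySem.Str.split? s2 " ").getD []
  words.foldl (fun l word => l ++ [PySem.Str.len word]) []

-- ===== PORT B =====
-- B-side helper: one loop step of Source B (skip ','/'.', flush on ' ', else count)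
def pvStepB (acc : List Int × Int) (c : Char) : List Int × Int :=
  if c = ',' ∨ c = '.' then acc
  else if c = ' ' then (acc.1 ++ [acc.2], 0)
  else (acc.1, acc.2 + 1)

def create_word_counts_alt (s : String) : List Int :=
  let r := s.toList.foldl pvStepB ([], 0)
  r.1 ++ [r.2]

-- ===== PRECONDITION & SPEC =====
def Spec_create_word_counts (s : String) (out : List Int) : Prop := out = create_word_counts_alt s
instance (s : String) (out : List Int) : Decidable (Spec_create_word_counts s out) := by unfold Spec_create_word_counts; infer_instance

-- ===== CLAIM (what is proved, stated in full; the proofs are below) =====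
def Claim_equal_create_word_counts : Prop := ∀ (s : String), Dom_create_word_counts s → Spec_create_word_counts s (create_word_counts s)

-- ===== LEMMAS AND PROOFS =====

-- merged recursion: counts of non-',','.' characters between spaces, B-style
def countsGo (cs : List Char) (n : Int) : List Int :=
  match cs with
  | [] => [n]
  | c :: t =>
    if c = ',' || c = '.' then countsGo t n
    else if c = ' ' then n :: countsGo t 0
    else countsGo t (n + 1)

-- counts of characters between spaces (no removal)
def spaceCounts (cs : List Char) (n : Nat) : List Int :=
  match cs with
  | [] => [(n : Int)]
  | c :: t => if c = ' ' then (n : Int) :: spaceCounts t 0 else spaceCounts t (n + 1)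

-- remove every occurrence of d
def dropCh (d : Char) (cs : List Char) : List Char :=
  match cs with
  | [] => []
  | c :: t => if c = d then dropCh d t else c :: dropCh d t

theorem replace_go_drop (d : Char) :
    ∀ (l : List Char) (fuel : Nat) (acc : List Char), l.length ≤ fuel →
      PySem.Chars.replace.go [d] [] fuel l acc = acc.reverse ++ dropCh d l := by
  intro l
  induction l with
  | nil =>
    intro fuel acc _
    cases fuel <;> simp [PySem.Chars.replace.go, dropCh]
  | cons c t ih =>
    intro fuel acc h
    cases fuel with
    | zero => simp at h
    | succ f =>
      simp only [List.length_cons, Nat.succ_le_succ_iff] at h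
      by_cases hc : c = d
      · subst hc
        simp [PySem.Chars.replace.go, List.isPrefixOf, dropCh, ih f acc h]
      · simp [PySem.Chars.replace.go, List.isPrefixOf, hc, dropCh, Ne.symm hc,
          ih f (c :: acc) h]

theorem replace_drop (l : List Char) (d : Char) :
    PySem.Chars.replace l [d] [] = dropCh d l := by
  simp [PySem.Chars.replace, replace_go_drop d l l.length [] (le_refl _)]

theorem splitGo_counts :
    ∀ (l : List Char) (fuel : Nat) (cur : List Char) (acc : List (List Char)),
      l.length ≤ fuel →
      (PySem.Chars.splitOn.go [' '] fuel l cur acc).map (fun w => (w.length : Int)) =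
        acc.reverse.map (fun w => (w.length : Int)) ++ spaceCounts l cur.length := by
  intro l
  induction l with
  | nil =>
    intro fuel cur acc _
    cases fuel <;> simp [PySem.Chars.splitOn.go, spaceCounts]
  | cons c t ih =>
    intro fuel cur acc h
    cases fuel with
    | zero => simp at h
    | succ f =>
      simp only [List.length_cons, Nat.succ_le_succ_iff] at h
      by_cases hc : c = ' '
      · subst hc
        simp [PySem.Chars.splitOn.go, List.isPrefixOf, ih f [] (cur.reverse :: acc) h,
          spaceCounts]
      · have hc' : ¬ (' ' = c) := fun h' => hc h'.symm
        simp [PySem.Chars.splitOn.go, List.isPrefixOf, hc, hc', List.map_reverse,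
          ih f (c :: cur) acc h, spaceCounts]

theorem splitOn_counts (cs : List Char) :
    (PySem.Chars.splitOn cs [' ']).map (fun w => (w.length : Int)) = spaceCounts cs 0 := by
  simpa using splitGo_counts cs (cs.length + 1) [] [] (by omega)

theorem spaceCounts_drop :
    ∀ (cs : List Char) (n : Nat),
      spaceCounts (dropCh '.' (dropCh ',' cs)) n = countsGo cs (n : Int) := by
  intro cs
  induction cs with
  | nil => intro n; simp [dropCh, spaceCounts, countsGo]
  | cons c t ih =>
    intro n
    by_cases h1 : c = ','
    · subst h1; simpa [dropCh, countsGo] using ih n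
    · by_cases h2 : c = '.'
      · subst h2; simpa [dropCh, countsGo] using ih n
      · by_cases h3 : c = ' '
        · subst h3
          simpa [dropCh, spaceCounts, countsGo, h1, h2] using ih 0
        · have := ih (n + 1)
          push_cast at this
          simpa [dropCh, spaceCounts, countsGo, h1, h2, h3] using this

theorem foldl_append_len (ws : List String) :
    ∀ (acc : List Int),
      ws.foldl (fun l word => l ++ [PySem.Str.len word]) acc =
        acc ++ ws.map (fun w => PySem.Str.len w) := by
  induction ws with
  | nil => intro acc; simp
  | cons w t ih =>
    intro acc
    rw [List.foldl_cons, ih]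
    simp

theorem alt_foldl_counts :
    ∀ (cs : List Char) (out : List Int) (n : Int),
      (cs.foldl pvStepB (out, n)).1 ++ [(cs.foldl pvStepB (out, n)).2] = out ++ countsGo cs n := by
  intro cs
  induction cs with
  | nil => intro out n; simp [countsGo]
  | cons c t ih =>
    intro out n
    by_cases h1 : c = ','
    · subst h1; simp [countsGo, pvStepB, ih]
    · by_cases h2 : c = '.'
      · subst h2; simp [countsGo, pvStepB, ih]
      · by_cases h3 : c = ' '
        · subst h3; simp [countsGo, pvStepB, h1, h2, ih]
        · simp [countsGo, pvStepB, h1, h2, h3, ih]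

-- ===== VERDICT (by name: the statement is the Claim_ definition above) =====
theorem create_word_counts_spec : Claim_equal_create_word_counts := by
  intro s _
  unfold Spec_create_word_counts
  simp only [create_word_counts, create_word_counts_alt]
  have hfilt : (PySem.Str.replace (PySem.Str.replace s "," "") "." "").toList =
      dropCh '.' (dropCh ',' s.toList) := by
    rw [PySem.Str.toList_replace, PySem.Str.toList_replace,
      show ("," : String).toList = [','] from rfl,
      show ("." : String).toList = ['.'] from rfl,
      show ("" : String).toList = [] from rfl,
      replace_drop, replace_drop]
  have hsplit := PySem.Str.split?_map (PySem.Str.replace (PySem.Str.replace s "," "") "." "") " "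
  rw [show (" " : String).toList = [' '] from rfl] at hsplit
  simp only [PySem.Chars.split?, List.isEmpty_cons, Bool.false_eq_true, if_false] at hsplit
  cases hws : PySem.Str.split? (PySem.Str.replace (PySem.Str.replace s "," "") "." "") " " with
  | none => rw [hws] at hsplit; simp at hsplit
  | some ws =>
    rw [hws] at hsplit
    simp only [Option.map_some, Option.some.injEq] at hsplit
    simp only [Option.getD_some]
    rw [foldl_append_len ws [], alt_foldl_counts s.toList [] 0]
    have hlen : ws.map (fun w => PySem.Str.len w) =
        (PySem.Chars.splitOn (PySem.Str.replace (PySem.Str.replace s "," "") "." "").toList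
          [' ']).map (fun w => (w.length : Int)) := by
      rw [← hsplit]
      simp [PySem.Str.len_eq, Function.comp]
    rw [hlen, hfilt, splitOn_counts, spaceCounts_drop]
    simp
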